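-- pv_equiv track=rewrite | github.com/eliottcassidy2000/math | 04-computation/zero_sum_walsh_analysis.py | zero_sum_count
-- ===== SOURCE A (Python) =====
-- def zero_sum_count(vals, p):
--     """Count #{eps in {+1,-1}^d : sum eps_i * vals[i] = 0 mod p}."""
--     d = len(vals)
--     W = 0
--     for bits in range(1 << d):
--         eps = [(1 if bits & (1 << j) else -1) for j in range(d)]
--         s = sum(e * v for e, v in zip(eps, vals)) % p
--         if s == 0:
--             W += 1
--     return W
-- ===== SOURCE B (Python) =====
-- def zero_sum_count(vals, p):
--     """Count #{eps in {+1,-1}^d : sum eps_i * vals[i] = 0 mod p}."""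
--     m = abs(p)
--     cnt = {0: 1}
--     for v in vals:
--         new = {}
--         for r, c in cnt.items():
--             for s in ((r + v) % m, (r - v) % m):
--                 new[s] = new.get(s, 0) + c
--         cnt = new
--     return cnt.get(0, 0)
-- ===== Notes on version B (the rewrite author's own statement) =====
-- stated objective: faster
-- what changed: Replaces the exhaustive enumeration of all 2^d sign vectors by a dynamic program over residues mod |p|, keeping a dict from reachable residue to the number of sign prefixes attaining it.
import Mathlib
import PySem

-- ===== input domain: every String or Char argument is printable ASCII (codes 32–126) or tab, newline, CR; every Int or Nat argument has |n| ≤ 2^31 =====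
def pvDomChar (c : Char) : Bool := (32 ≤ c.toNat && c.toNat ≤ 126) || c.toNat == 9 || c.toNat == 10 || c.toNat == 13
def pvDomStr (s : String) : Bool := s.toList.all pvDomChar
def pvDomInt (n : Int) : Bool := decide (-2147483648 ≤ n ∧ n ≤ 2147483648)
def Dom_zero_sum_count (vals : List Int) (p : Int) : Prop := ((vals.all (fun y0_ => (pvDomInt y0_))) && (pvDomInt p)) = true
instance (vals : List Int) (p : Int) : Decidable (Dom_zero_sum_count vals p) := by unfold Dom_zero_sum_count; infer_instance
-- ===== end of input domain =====

-- B replaces A's enumeration of all 2^d sign vectors by a residue-count dynamic program mod |p| (faster; asymptotic).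

-- ===== PORT A =====
-- literal port of A: loop over bits in range(2^d), build eps, test (sum eps_i*vals_i) % p == 0
def zero_sum_count (vals : List Int) (p : Int) : Int :=
  let d := vals.length
  (PySem.List.pyRange 0 ((2:Int) ^ d) 1).foldl
    (fun W bits =>
      let eps : List Int := (PySem.List.pyRange 0 (d : Int) 1).map
        (fun j => if PySem.Int.band bits ((1:Int) <<< j.toNat) ≠ 0 then 1 else -1)
        -- `bits & (1 << j)`: j ranges over 0..d-1 so `j.toNat` is exact
      let s := PySem.Int.mod ((eps.zip vals).foldl (fun acc ev => acc + ev.1 * ev.2) 0) p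
      if s = 0 then W + 1 else W) 0

-- ===== PORT B =====
-- B-side helpers: the body of Source B's inner loop (`for s in ((r+v)%m, (r-v)%m): new[s] = new.get(s,0)+c`)
def bInner (m v : Int) (new : PySem.Dict Int Int) (rc : Int × Int) : PySem.Dict Int Int :=
  [PySem.Int.mod (rc.1 + v) m, PySem.Int.mod (rc.1 - v) m].foldl
    (fun new s => new.insert s (new.getD s 0 + rc.2)) new
-- one pass of Source B's outer loop: rebuild the residue-count dict after taking `v` with either sign
def bStep (m v : Int) (cnt : PySem.Dict Int Int) : PySem.Dict Int Int :=
  cnt.items.foldl (bInner m v) PySem.Dict.empty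

-- literal port of Source B: dict from residue mod |p| to the number of sign prefixes attaining it
def zero_sum_count_alt (vals : List Int) (p : Int) : Int :=
  let m : Int := |p|
  (vals.foldl (fun cnt v => bStep m v cnt) (PySem.Dict.empty.insert 0 1)).getD 0 0

-- ===== PRECONDITION & SPEC =====
-- Pre_ excludes exactly p = 0, where A always raises ZeroDivisionError (`s % 0`)
def Pre_zero_sum_count (vals : List Int) (p : Int) : Prop := p ≠ 0
instance (vals : List Int) (p : Int) : Decidable (Pre_zero_sum_count vals p) := by unfold Pre_zero_sum_count; infer_instance
def pvWitness_zero_sum_count : List Int × Int := ([1, 2, 3], 5)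

def Spec_zero_sum_count (vals : List Int) (p : Int) (out : Int) : Prop := out = zero_sum_count_alt vals p
instance (vals : List Int) (p : Int) (out : Int) : Decidable (Spec_zero_sum_count vals p out) := by unfold Spec_zero_sum_count; infer_instance

-- ===== CLAIM (what is proved, stated in full; the proofs are below) =====
def Claim_equal_zero_sum_count : Prop := ∀ (vals : List Int) (p : Int), Dom_zero_sum_count vals p → Pre_zero_sum_count vals p → Spec_zero_sum_count vals p (zero_sum_count vals p)

-- ===== LEMMAS AND PROOFS =====

/-- The common mathematical value: number of sign vectors `eps` over `vs` with
`(Σ eps_i * vs_i + t) % p == 0`, by structural recursion on `vs`. -/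
def signCnt (p : Int) : List Int → Int → Int
  | [], t => if PySem.Int.mod t p = 0 then 1 else 0
  | v :: vs, t => signCnt p vs (t + v) + signCnt p vs (t - v)

theorem signCnt_snoc (p v : Int) (ws : List Int) (t : Int) :
    signCnt p (ws ++ [v]) t = signCnt p ws (t + v) + signCnt p ws (t - v) := by
  induction ws generalizing t with
  | nil => simp [signCnt]
  | cons w ws ih =>
      simp only [List.cons_append, signCnt, ih]
      have h1 : t + w + v = t + v + w := by ring
      have h2 : t + w - v = t - v + w := by ring
      have h3 : t - w + v = t + v - w := by ring
      have h4 : t - w - v = t - v - w := by ring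
      rw [h1, h2, h3, h4]; ring

theorem signCnt_mod_shift (p : Int) (vs : List Int) (t k : Int) :
    signCnt p vs (t + k * p) = signCnt p vs t := by
  induction vs generalizing t with
  | nil =>
      simp only [signCnt, PySem.Int.mod_eq_zero_iff_dvd]
      have : p ∣ t + k * p ↔ p ∣ t := by
        constructor <;> intro h
        · simpa using h.sub (dvd_mul_left p k)
        · exact dvd_add h (dvd_mul_left p k)
      simp [this]
  | cons v vs ih =>
      simp only [signCnt]
      have h1 : t + k * p + v = t + v + k * p := by ring
      have h2 : t + k * p - v = t - v + k * p := by ring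
      rw [h1, h2, ih, ih]

/-- shifting the offset by a multiple of `|p|` does not change the count -/
theorem signCnt_abs_shift (p : Int) (vs : List Int) (t k : Int) :
    signCnt p vs (t + k * |p|) = signCnt p vs t := by
  rcases abs_choice p with h | h
  · rw [h]; exact signCnt_mod_shift p vs t k
  · rw [h]
    have : t + k * -p = t + (-k) * p := by ring
    rw [this]; exact signCnt_mod_shift p vs t (-k)

-- ===== A side =====

def dotL (xs ys : List Int) : Int := (xs.zip ys).foldl (fun acc ev => acc + ev.1 * ev.2) 0

def epsN (d k : Nat) : List Int := (List.range d).map (fun j => if k.testBit j then 1 else -1)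

def SAt (p : Int) (vals : List Int) (t : Int) : Int :=
  ((List.range (2 ^ vals.length)).map
    (fun k => if PySem.Int.mod (dotL (epsN vals.length k) vals + t) p = 0 then (1:Int) else 0)).sum

theorem length_epsN (d k : Nat) : (epsN d k).length = d := by simp [epsN]

theorem dotL_snoc (xs ys : List Int) (e v : Int) (h : xs.length = ys.length) :
    dotL (xs ++ [e]) (ys ++ [v]) = dotL xs ys + e * v := by
  unfold dotL
  rw [List.zip_append h, List.foldl_append]
  rfl

theorem epsN_succ_low (d k : Nat) (hk : k < 2 ^ d) :
    epsN (d + 1) k = epsN d k ++ [(-1 : Int)] := by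
  unfold epsN
  rw [List.range_succ, List.map_append]
  simp [Nat.testBit_lt_two_pow hk]

theorem epsN_succ_high (d k : Nat) (hk : k < 2 ^ d) :
    epsN (d + 1) (2 ^ d + k) = epsN d k ++ [(1 : Int)] := by
  unfold epsN
  rw [List.range_succ, List.map_append]
  congr 1
  · apply List.map_congr_left
    intro j hj
    rw [Nat.testBit_two_pow_add_gt (List.mem_range.mp hj)]
  · simp [Nat.testBit_two_pow_add_eq, Nat.testBit_lt_two_pow hk]

theorem SAt_snoc (p v : Int) (vs : List Int) (t : Int) :
    SAt p (vs ++ [v]) t = SAt p vs (t - v) + SAt p vs (t + v) := by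
  unfold SAt
  have hlen : (vs ++ [v]).length = vs.length + 1 := by simp
  rw [hlen]
  have hpow : 2 ^ (vs.length + 1) = 2 ^ vs.length + 2 ^ vs.length := by ring
  rw [hpow, List.range_add, List.map_append, List.sum_append, List.map_map]
  congr 1
  · apply congrArg; apply List.map_congr_left
    intro k hk
    have hk' := List.mem_range.mp hk
    rw [epsN_succ_low vs.length k hk',
        dotL_snoc _ _ _ _ (by rw [length_epsN])]
    have : dotL (epsN vs.length k) vs + -1 * v + t = dotL (epsN vs.length k) vs + (t - v) := by ring
    rw [this]
  · apply congrArg; apply List.map_congr_left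
    intro k hk
    have hk' := List.mem_range.mp hk
    simp only [Function.comp]
    rw [epsN_succ_high vs.length k hk',
        dotL_snoc _ _ _ _ (by rw [length_epsN])]
    have : dotL (epsN vs.length k) vs + 1 * v + t = dotL (epsN vs.length k) vs + (t + v) := by ring
    rw [this]

theorem SAt_eq_signCnt (p : Int) (vals : List Int) (t : Int) :
    SAt p vals t = signCnt p vals t := by
  induction vals using List.reverseRecOn generalizing t with
  | nil => simp [SAt, signCnt, epsN, dotL]
  | append_singleton vs v ih =>
      rw [SAt_snoc, ih, ih, signCnt_snoc]; ring

theorem eps_port_eq (d k : Nat) :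
    ((PySem.List.pyRange 0 (d : Int) 1).map
      (fun j => if PySem.Int.band (k : Int) ((1:Int) <<< j.toNat) ≠ 0 then (1:Int) else -1)) = epsN d k := by
  rw [PySem.List.pyRange_one, List.map_map, sub_zero, Int.toNat_natCast]
  unfold epsN
  apply List.map_congr_left
  intro j hj
  simp only [Function.comp_apply, zero_add, Int.toNat_natCast]
  have h1 : (1:Int) <<< (j : Int) = ((2 ^ j : Nat) : Int) := by
    rw [Int.shiftLeft_eq_mul_pow]; push_cast; ring
  simp only [h1, PySem.Int.band_natCast, Nat.and_two_pow]
  cases hb : k.testBit j <;> simp [hb, Nat.pow_eq_zero]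

theorem A_eq_SAt (vals : List Int) (p : Int) :
    zero_sum_count vals p = SAt p vals 0 := by
  simp only [zero_sum_count, SAt, add_zero]
  have hcast : ((2:Int) ^ vals.length) = ((2 ^ vals.length : Nat) : Int) := by
    push_cast; ring
  rw [hcast, PySem.List.pyRange_one 0 ((2 ^ vals.length : Nat) : Int), sub_zero,
      Int.toNat_natCast, List.foldl_map]
  trans ((List.range (2 ^ vals.length)).foldl
      (fun (W : Int) (k : Nat) =>
        if (fun kk => decide (PySem.Int.mod (dotL (epsN vals.length kk) vals) p = 0)) k = true
        then W + 1 else W) 0)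
  · apply List.foldl_ext
    intro W k hk
    simp only [zero_add, eps_port_eq, decide_eq_true_eq]
    rfl
  · rw [PySem.List.foldl_count_if, zero_add, ← PySem.List.sum_map_ite_one_zero]
    apply congrArg
    apply List.map_congr_left
    intro k hk
    simp [decide_eq_true_eq]

-- ===== B side =====

theorem insert2_getD (d : PySem.Dict Int Int) (a b c s : Int) :
    ((d.insert a (d.getD a 0 + c)).insert b ((d.insert a (d.getD a 0 + c)).getD b 0 + c)).getD s 0
      = d.getD s 0 + ((if a = s then c else 0) + (if b = s then c else 0)) := by
  rw [PySem.Dict.getD_insert, PySem.Dict.getD_insert, PySem.Dict.getD_insert]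
  split_ifs <;> subst_vars <;> (try simp_all) <;> (try ring)

/-- value of a dict after the inner loop of one `bStep`, as a sum over the items list -/
theorem getD_foldl_bInner (m v : Int) (L : List (Int × Int)) (d : PySem.Dict Int Int) (s : Int) :
    (L.foldl (bInner m v) d).getD s 0 = d.getD s 0 +
      (L.map (fun rc => (if PySem.Int.mod (rc.1 + v) m = s then rc.2 else 0) +
                         (if PySem.Int.mod (rc.1 - v) m = s then rc.2 else 0))).sum := by
  induction L generalizing d with
  | nil => simp
  | cons rc L ih =>
      rw [List.foldl_cons, ih, List.map_cons, List.sum_cons]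
      have hb : bInner m v d rc =
          (d.insert (PySem.Int.mod (rc.1 + v) m) (d.getD (PySem.Int.mod (rc.1 + v) m) 0 + rc.2)).insert
            (PySem.Int.mod (rc.1 - v) m)
            ((d.insert (PySem.Int.mod (rc.1 + v) m) (d.getD (PySem.Int.mod (rc.1 + v) m) 0 + rc.2)).getD
              (PySem.Int.mod (rc.1 - v) m) 0 + rc.2) := rfl
      rw [hb, insert2_getD]; ring

theorem nodup_keys_foldl_bInner (m v : Int) (L : List (Int × Int)) (d : PySem.Dict Int Int)
    (h : d.keys.Nodup) : (L.foldl (bInner m v) d).keys.Nodup := by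
  induction L generalizing d with
  | nil => exact h
  | cons rc L ih =>
      rw [List.foldl_cons]
      apply ih
      simp only [bInner, List.foldl_cons, List.foldl_nil]
      exact PySem.Dict.nodup_keys_insert _ _ _ (PySem.Dict.nodup_keys_insert _ _ _ h)

theorem keys_range_foldl_bInner (m v : Int) (hm : 0 < m) (L : List (Int × Int))
    (d : PySem.Dict Int Int) (h : ∀ k ∈ d.keys, 0 ≤ k ∧ k < m) :
    ∀ k ∈ (L.foldl (bInner m v) d).keys, 0 ≤ k ∧ k < m := by
  induction L generalizing d with
  | nil => exact h
  | cons rc L ih =>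
      rw [List.foldl_cons]
      apply ih
      intro k hk
      simp only [bInner, List.foldl_cons, List.foldl_nil, PySem.Dict.mem_keys_insert] at hk
      rcases hk with rfl | hk
      · exact ⟨PySem.Int.mod_nonneg _ hm, PySem.Int.mod_lt _ hm⟩
      rcases hk with rfl | hk
      · exact ⟨PySem.Int.mod_nonneg _ hm, PySem.Int.mod_lt _ hm⟩
      · exact h k hk

theorem sum_ite_key_zero (L : List (Int × Int)) (r0 : Int) (h : r0 ∉ L.map (·.1)) :
    (L.map (fun rc => if rc.1 = r0 then rc.2 else 0)).sum = 0 := by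
  induction L with
  | nil => simp
  | cons rc L ih =>
      simp only [List.map_cons, List.mem_cons, not_or] at h ⊢
      rw [List.sum_cons, if_neg (fun he => h.1 he.symm), ih h.2, add_zero]

theorem sum_ite_key_mem (L : List (Int × Int)) (r0 c : Int) (hnd : (L.map (·.1)).Nodup)
    (h : (r0, c) ∈ L) : (L.map (fun rc => if rc.1 = r0 then rc.2 else 0)).sum = c := by
  induction L with
  | nil => simp at h
  | cons rc L ih =>
      rw [List.map_cons, List.nodup_cons] at hnd
      rcases List.mem_cons.mp h with rfl | hmem
      · rw [List.map_cons, List.sum_cons, if_pos rfl,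
            sum_ite_key_zero L r0 hnd.1, add_zero]
      · have hne : rc.1 ≠ r0 := by
          intro he
          exact hnd.1 (he ▸ (List.mem_map.mpr ⟨(r0, c), hmem, rfl⟩))
        rw [List.map_cons, List.sum_cons, if_neg hne, ih hnd.2 hmem, zero_add]

/-- the key-indicator sum over a dict's items is a lookup -/
theorem sum_ite_key_getD (d : PySem.Dict Int Int) (r0 : Int) (hnd : d.keys.Nodup) :
    (d.items.map (fun rc => if rc.1 = r0 then rc.2 else 0)).sum = d.getD r0 0 := by
  cases hg : d.get? r0 with
  | none =>
      have hnk : r0 ∉ d.keys := (PySem.Dict.get?_eq_none_iff_not_mem_keys d r0).mp hg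
      rw [PySem.Dict.getD_eq_get?_getD, hg, Option.getD_none]
      exact sum_ite_key_zero _ _ (by simpa [PySem.Dict.keys] using hnk)
  | some c =>
      rw [PySem.Dict.getD_eq_get?_getD, hg, Option.getD_some]
      exact sum_ite_key_mem _ _ _ (by simpa [PySem.Dict.keys] using hnd)
        (PySem.Dict.mem_items_of_get?_eq_some d hg)

/-- Python-mod equation as a divisibility, for a target already in `[0, m)` -/
theorem mod_eq_iff_dvd (m a x : Int) (hm : 0 < m) (hx0 : 0 ≤ x) (hx1 : x < m) :
    PySem.Int.mod a m = x ↔ m ∣ a - x := by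
  rw [PySem.Int.mod_eq_emod_of_pos hm]
  constructor
  · intro h
    rw [Int.dvd_iff_emod_eq_zero, ← Int.emod_eq_emod_iff_emod_sub_eq_zero, h,
        Int.emod_eq_of_lt hx0 hx1]
  · intro h
    rw [Int.dvd_iff_emod_eq_zero, ← Int.emod_eq_emod_iff_emod_sub_eq_zero] at h
    rw [h, Int.emod_eq_of_lt hx0 hx1]

theorem mod_key_iff (m v r s : Int) (hm : 0 < m) (hr0 : 0 ≤ r) (hr1 : r < m)
    (hs0 : 0 ≤ s) (hs1 : s < m) :
    (PySem.Int.mod (r + v) m = s) ↔ (r = PySem.Int.mod (s - v) m) := by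
  rw [mod_eq_iff_dvd m (r + v) s hm hs0 hs1]
  rw [show (r = PySem.Int.mod (s - v) m) ↔ (PySem.Int.mod (s - v) m = r) from eq_comm]
  rw [mod_eq_iff_dvd m (s - v) r hm hr0 hr1]
  constructor <;> intro h
  · have h2 : m ∣ -(r + v - s) := dvd_neg.mpr h
    simpa [show -(r + v - s) = s - v - r by ring] using h2
  · have h2 : m ∣ -(s - v - r) := dvd_neg.mpr h
    simpa [show -(s - v - r) = r + v - s by ring] using h2

/-- invariant of Source B's loop: keys are the residues `[0, m)`, values count sign prefixes -/
def BInv (p m : Int) (ws : List Int) (d : PySem.Dict Int Int) : Prop :=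
  d.keys.Nodup ∧ (∀ k ∈ d.keys, 0 ≤ k ∧ k < m) ∧
    (∀ s : Int, 0 ≤ s → s < m → d.getD s 0 = signCnt p ws (-s))

theorem neg_mod_shift (p m a : Int) (vs : List Int) (hmp : m = |p|) :
    signCnt p vs (-(PySem.Int.mod a m)) = signCnt p vs (-a) := by
  have h := PySem.Int.floordiv_mul_add_mod a m
  have : -(PySem.Int.mod a m) = -a + PySem.Int.floordiv a m * m := by linarith
  rw [this, hmp, signCnt_abs_shift]

theorem bStep_inv (p m v : Int) (hm : 0 < m) (hmp : m = |p|) (ws : List Int)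
    (d : PySem.Dict Int Int) (h : BInv p m ws d) : BInv p m (ws ++ [v]) (bStep m v d) := by
  obtain ⟨hnd, hrange, hval⟩ := h
  refine ⟨nodup_keys_foldl_bInner m v _ _ (by simp [PySem.Dict.keys_empty]),
          keys_range_foldl_bInner m v hm _ _ (by simp [PySem.Dict.keys_empty]), ?_⟩
  intro s hs0 hs1
  unfold bStep
  rw [getD_foldl_bInner, PySem.Dict.getD_empty, zero_add, PySem.List.sum_map_add_int]
  have hkey : ∀ rc ∈ d.items, 0 ≤ rc.1 ∧ rc.1 < m := fun rc hrc =>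
    hrange rc.1 (PySem.Dict.mem_keys_of_mem_items d hrc)
  have h1 : (d.items.map (fun rc => if PySem.Int.mod (rc.1 + v) m = s then rc.2 else 0)).sum =
      signCnt p ws (v - s) := by
    have hcg : (d.items.map (fun rc => if PySem.Int.mod (rc.1 + v) m = s then rc.2 else 0)) =
        (d.items.map (fun rc => if rc.1 = PySem.Int.mod (s - v) m then rc.2 else 0)) := by
      apply List.map_congr_left
      intro rc hrc
      obtain ⟨hr0, hr1⟩ := hkey rc hrc
      exact if_congr (mod_key_iff m v rc.1 s hm hr0 hr1 hs0 hs1) rfl rfl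
    rw [hcg, sum_ite_key_getD d _ hnd,
        hval _ (PySem.Int.mod_nonneg _ hm) (PySem.Int.mod_lt _ hm),
        neg_mod_shift p m (s - v) ws hmp]
    congr 1; ring
  have h2 : (d.items.map (fun rc => if PySem.Int.mod (rc.1 - v) m = s then rc.2 else 0)).sum =
      signCnt p ws (-s - v) := by
    have hcg : (d.items.map (fun rc => if PySem.Int.mod (rc.1 - v) m = s then rc.2 else 0)) =
        (d.items.map (fun rc => if rc.1 = PySem.Int.mod (s + v) m then rc.2 else 0)) := by
      apply List.map_congr_left
      intro rc hrc
      obtain ⟨hr0, hr1⟩ := hkey rc hrc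
      have hiff := mod_key_iff m (-v) rc.1 s hm hr0 hr1 hs0 hs1
      simp only [show rc.1 + -v = rc.1 - v by ring, show s - -v = s + v by ring] at hiff
      exact if_congr hiff rfl rfl
    rw [hcg, sum_ite_key_getD d _ hnd,
        hval _ (PySem.Int.mod_nonneg _ hm) (PySem.Int.mod_lt _ hm),
        neg_mod_shift p m (s + v) ws hmp]
    congr 1; ring
  rw [h1, h2, signCnt_snoc]
  have hvs : -s + v = v - s := by ring
  rw [hvs]

theorem BInv_init (p m : Int) (hm : 0 < m) (hmp : m = |p|) :
    BInv p m [] (PySem.Dict.empty.insert 0 1) := by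
  refine ⟨PySem.Dict.nodup_keys_insert _ _ _ (by simp [PySem.Dict.keys_empty]), ?_, ?_⟩
  · intro k hk
    rw [PySem.Dict.mem_keys_insert] at hk
    rcases hk with rfl | hk
    · exact ⟨le_refl 0, hm⟩
    · simp [PySem.Dict.keys_empty] at hk
  · intro s hs0 hs1
    rw [PySem.Dict.getD_insert]
    by_cases hz : s = 0
    · subst hz
      have hm0 : PySem.Int.mod 0 p = 0 := by
        rw [PySem.Int.mod_eq_zero_iff_dvd]; exact dvd_zero p
      simp [signCnt, hm0]
    · have hnd : ¬ PySem.Int.mod (-s) p = 0 := by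
        rw [PySem.Int.mod_eq_zero_iff_dvd]
        intro hdvd
        have hdvd' : m ∣ s := by
          rw [hmp]
          exact (abs_dvd p s).mpr (Int.dvd_neg.mp hdvd)
        have hpos : 0 < s := lt_of_le_of_ne hs0 (fun he => hz he.symm)
        have := Int.le_of_dvd hpos hdvd'
        omega
      rw [if_neg hz, PySem.Dict.getD_empty]
      simp [signCnt, hnd]

theorem foldl_bStep_inv (p m : Int) (hm : 0 < m) (hmp : m = |p|) (vs : List Int) :
    ∀ (ws : List Int) (d : PySem.Dict Int Int), BInv p m ws d →
      BInv p m (ws ++ vs) (vs.foldl (fun cnt v => bStep m v cnt) d) := by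
  induction vs with
  | nil => intro ws d h; simpa using h
  | cons v vs ih =>
      intro ws d h
      rw [List.foldl_cons]
      have := ih (ws ++ [v]) (bStep m v d) (bStep_inv p m v hm hmp ws d h)
      simpa using this

theorem B_eq_signCnt (vals : List Int) (p : Int) (hp : p ≠ 0) :
    zero_sum_count_alt vals p = signCnt p vals 0 := by
  have hm : (0:Int) < |p| := abs_pos.mpr hp
  have hinv := foldl_bStep_inv p |p| hm rfl vals [] (PySem.Dict.empty.insert 0 1)
    (BInv_init p |p| hm rfl)
  unfold zero_sum_count_alt
  rw [hinv.2.2 0 (le_refl 0) hm]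
  simp

-- ===== VERDICT (by name: the statement is the Claim_ definition above) =====
theorem zero_sum_count_spec : Claim_equal_zero_sum_count := by
  intro vals p _ hp
  unfold Spec_zero_sum_count
  rw [A_eq_SAt, SAt_eq_signCnt, B_eq_signCnt vals p hp]
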